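-- pv_equiv track=rewrite | github.com/tanupriya9102/Aditya-Verma-Playlists | Recursion/PERMUTATION_WITH_SPACE.py | pws
-- ===== SOURCE A (Python) =====
-- def pws(ip,op):
--      res=[]
--      if len(ip)==0:
--          res.append(op)
--          return res
--      op1=op2=op
--      op1+=ip[0]
--      op2+="_"
--      op2+=ip[0]
--      ip=ip[1:]
--      res+=pws(ip,op1)
--      res+=pws(ip,op2)
--      return res
-- ===== SOURCE B (Python) =====
-- def pws(ip, op):
--     n = len(ip)
--     res = []
--     for mask in range(2 ** n):
--         s = op
--         k = n
--         for c in ip: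
--             k -= 1
--             if (mask >> k) & 1:
--                 s += "_"
--             s += c
--         res.append(s)
--     return res
-- ===== Notes on version B (the rewrite author's own statement) =====
-- stated objective: alternative
-- what changed: Replaced A's binary recursion (two recursive calls per character, threading a growing prefix) with a single iterative loop over bitmasks 0..2^n-1 that builds each output string directly, bit k deciding the underscore before the corresponding character.
import Mathlib
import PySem

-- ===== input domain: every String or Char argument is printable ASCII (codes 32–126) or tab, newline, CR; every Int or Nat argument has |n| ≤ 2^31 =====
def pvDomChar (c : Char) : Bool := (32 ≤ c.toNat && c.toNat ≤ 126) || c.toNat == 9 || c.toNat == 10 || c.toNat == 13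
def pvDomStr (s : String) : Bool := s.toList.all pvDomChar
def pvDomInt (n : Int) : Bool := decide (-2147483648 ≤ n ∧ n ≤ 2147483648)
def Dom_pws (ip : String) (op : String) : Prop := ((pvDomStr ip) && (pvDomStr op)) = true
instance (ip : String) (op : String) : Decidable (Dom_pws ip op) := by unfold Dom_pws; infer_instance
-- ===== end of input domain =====

-- B replaces A's binary recursion by an iterative enumeration of bitmasks (one mask per output,
-- MSB = first character, set bit = underscore before that character); same output list, same order.


-- ===== PORT A =====
-- A recurses on the characters of ip, threading the accumulated prefix op.
def pwsA : List Char → String → List String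
  | [], op => [op]
  | c :: rest, op =>
      let op1 := op.push c
      let op2 := (op.push '_').push c
      pwsA rest op1 ++ pwsA rest op2

def pws (ip : String) (op : String) : List String := pwsA ip.toList op

-- ===== PORT B =====
-- inner loop of Source B: s = op; k = n; for c in ip: k -= 1; if (mask >> k) & 1: s += '_'; s += c
def pwsBuild (mask : Nat) (op : String) (cs : List Char) (k : Nat) : String :=
  (cs.foldl (fun (p : String × Nat) c =>
      let k' := p.2 - 1
      ((if (mask >>> k') &&& 1 = 1 then p.1.push '_' else p.1).push c, k')) (op, k)).1

def pws_alt (ip : String) (op : String) : List String :=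
  let n := ip.toList.length
  (List.range (2 ^ n)).map (fun mask => pwsBuild mask op ip.toList n)

-- ===== PRECONDITION & SPEC =====
def Spec_pws (ip : String) (op : String) (out : List String) : Prop := out = pws_alt ip op
instance (ip : String) (op : String) (out : List String) : Decidable (Spec_pws ip op out) := by unfold Spec_pws; infer_instance

-- ===== CLAIM (what is proved, stated in full; the proofs are below) =====
def Claim_equal_pws : Prop := ∀ (ip : String) (op : String), Dom_pws ip op → Spec_pws ip op (pws ip op)

-- ===== LEMMAS AND PROOFS =====

theorem pwsBuild_cons (mask : Nat) (op : String) (c : Char) (cs : List Char) :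
    pwsBuild mask op (c :: cs) (cs.length + 1) =
      pwsBuild mask ((if (mask >>> cs.length) &&& 1 = 1 then op.push '_' else op).push c)
        cs cs.length := by
  simp [pwsBuild, List.foldl]

theorem bit_low_add (L j mask : Nat) (hj : j < L) :
    ((mask + 2 ^ L) >>> j) &&& 1 = (mask >>> j) &&& 1 := by
  rw [Nat.shiftRight_eq_div_pow, Nat.shiftRight_eq_div_pow, Nat.and_one_is_mod,
    Nat.and_one_is_mod]
  have h2 : 2 ^ L = 2 ^ (L - j - 1) * 2 * 2 ^ j := by
    rw [mul_assoc, mul_comm 2 (2 ^ j), ← pow_succ, ← pow_add]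
    congr 1
    omega
  rw [h2, Nat.add_mul_div_right _ _ (Nat.two_pow_pos j),
    mul_comm (2 ^ (L - j - 1)) 2, Nat.add_mul_mod_self_left]

theorem bit_high_self (L mask : Nat) (h : mask < 2 ^ L) : (mask >>> L) &&& 1 = 0 := by
  rw [Nat.shiftRight_eq_div_pow, Nat.and_one_is_mod, Nat.div_eq_of_lt h]

theorem bit_high_add (L mask : Nat) (h : mask < 2 ^ L) :
    ((mask + 2 ^ L) >>> L) &&& 1 = 1 := by
  rw [Nat.shiftRight_eq_div_pow, Nat.and_one_is_mod]
  have : (mask + 2 ^ L) / 2 ^ L = 1 := by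
    rw [Nat.add_div_right _ (Nat.two_pow_pos L), Nat.div_eq_of_lt h]
  rw [this]

theorem pwsBuild_add (L mask : Nat) :
    ∀ (cs : List Char) (op : String), cs.length ≤ L →
      pwsBuild (mask + 2 ^ L) op cs cs.length = pwsBuild mask op cs cs.length
  | [], op, _ => by simp [pwsBuild]
  | c :: cs, op, h => by
    rw [show (c :: cs).length = cs.length + 1 from rfl, pwsBuild_cons, pwsBuild_cons,
      bit_low_add L cs.length mask (by simpa using h)]
    exact pwsBuild_add L mask cs _ (by simpa using Nat.le_of_succ_le h)

theorem pwsA_eq : ∀ (cs : List Char) (op : String),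
    pwsA cs op = (List.range (2 ^ cs.length)).map (fun m => pwsBuild m op cs cs.length)
  | [], op => by simp [pwsA, pwsBuild]
  | c :: cs, op => by
    have hlen : (c :: cs).length = cs.length + 1 := rfl
    rw [pwsA, pwsA_eq cs, pwsA_eq cs, hlen, pow_succ, mul_two, List.range_add,
      List.map_append, List.map_map]
    congr 1
    · refine List.map_congr_left (fun m hm => ?_)
      have hm' : m < 2 ^ cs.length := List.mem_range.mp hm
      rw [pwsBuild_cons, bit_high_self cs.length m hm']
      simp
    · refine List.map_congr_left (fun m hm => ?_)
      have hm' : m < 2 ^ cs.length := List.mem_range.mp hm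
      show pwsBuild m ((op.push '_').push c) cs cs.length
        = pwsBuild (2 ^ cs.length + m) op (c :: cs) (cs.length + 1)
      rw [Nat.add_comm, pwsBuild_cons, bit_high_add cs.length m hm',
        pwsBuild_add cs.length m cs _ (le_refl _)]
      simp

-- ===== VERDICT (by name: the statement is the Claim_ definition above) =====
theorem pws_spec : Claim_equal_pws := by
  intro ip op _
  unfold Spec_pws pws pws_alt
  exact pwsA_eq ip.toList op
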